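-- pv_equiv track=rewrite | github.com/MrBrantCode/unitest_baseline | mut_generate/mist_train_taco/taco_18296/solution.py | min_cost_to_paint_walls
-- ===== SOURCE A (Python) =====
-- from typing import List
--
-- def min_cost_to_paint_walls(costs: List[List[int]]) -> int:
--     inf = 10 ** 18
--     n = len(costs)
--     k = len(costs[0]) if n > 0 else 0
--
--     if k == 1 and n > 1:
--         return -1
--
--     nmin = [[0, -1], [0, -1]]
--
--     for i in range(1, n + 1):
--         min1 = nmin[:]
--         nmin = []
--         for j in range(1, k + 1):
--             mini = min1[0]
--             if mini[1] == j - 1: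
--                 mini = min1[1]
--             cost = [costs[i - 1][j - 1] + mini[0], j - 1]
--             nmin.append(cost)
--             nmin.sort()
--             nmin = nmin[:2]
--
--     return nmin[0][0]
-- ===== SOURCE B (Python) =====
-- def min_cost_to_paint_walls(costs):
--     n = len(costs)
--     if n == 0:
--         return 0
--     k = len(costs[0])
--     if k == 1 and n > 1:
--         return -1
--     dp = [0] * k
--     for row in costs:
--         dp = [row[j] + min([dp[c] for c in range(k) if c != j], default=0)
--               for j in range(k)]
--     return sorted(dp)[0]
-- ===== Notes on version B (the rewrite author's own statement) =====
-- stated objective: simpler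
-- what changed: A tracks the two smallest (cost, colour) entries by appending, sorting and truncating a running 2-row inside the colour loop; B is the textbook DP that rebuilds each row with a full rescan of the previous row (min over all colours c != j), with no two-minimum bookkeeping.
import Mathlib
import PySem

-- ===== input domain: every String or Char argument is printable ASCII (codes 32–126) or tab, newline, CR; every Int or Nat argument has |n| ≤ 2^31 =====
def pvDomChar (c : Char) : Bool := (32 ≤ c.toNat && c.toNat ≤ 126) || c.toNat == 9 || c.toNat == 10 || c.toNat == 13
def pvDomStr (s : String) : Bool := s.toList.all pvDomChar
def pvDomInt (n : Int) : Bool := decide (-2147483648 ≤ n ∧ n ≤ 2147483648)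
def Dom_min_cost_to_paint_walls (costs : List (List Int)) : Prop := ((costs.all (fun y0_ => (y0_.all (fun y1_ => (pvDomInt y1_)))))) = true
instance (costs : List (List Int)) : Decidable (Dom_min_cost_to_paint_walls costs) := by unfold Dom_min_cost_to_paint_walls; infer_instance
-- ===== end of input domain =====

-- B replaces A's incremental two-minimum bookkeeping (append/sort/truncate of a 2-row) by the
-- textbook O(n·k²) DP row where each entry rescans the whole previous row; objective: simpler.

-- ===== PORT A =====
-- A-side helper: the inner 'for j in range(1, k+1)' loop of A, with min1 the copied previous state
-- and row = costs[i-1].  Python's 2-element lists [cost, colour] are ported as pairs, so 'mini[0]'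
-- is '.1' and 'mini[1]' is '.2' (exact: those lists always have length 2); 'nmin.sort()' on such
-- lists is lexicographic, ported as PySem.List.sorted2; 'nmin[:2]' is the slice.
def pvInnerA (min1 : List (Int × Int)) (row : List Int) (k : Int) : List (Int × Int) :=
  (PySem.List.pyRange 1 (k + 1) 1).foldl (fun nm j =>
    let mini := if (PySem.List.pyGetD min1 0 ((0:Int), (0:Int))).2 = j - 1
                then PySem.List.pyGetD min1 1 ((0:Int), (0:Int))
                else PySem.List.pyGetD min1 0 ((0:Int), (0:Int))
    let cost : Int × Int := (PySem.List.pyGetD row (j - 1) 0 + mini.1, j - 1)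
    PySem.List.slice (PySem.List.sorted2 (nm ++ [cost]) Prod.fst Prod.snd) none (some 2)) []

def min_cost_to_paint_walls (costs : List (List Int)) : Int :=
  let n : Int := (costs.length : Int)
  let k : Int := if 0 < n then ((PySem.List.pyGetD costs 0 []).length : Int) else 0
  if k = 1 ∧ 1 < n then -1
  else
    let nmin0 : List (Int × Int) := [(0, -1), (0, -1)]
    let nmin := (PySem.List.pyRange 1 (n + 1) 1).foldl
      (fun nmin i => pvInnerA nmin (PySem.List.pyGetD costs (i - 1) []) k) nmin0
    (PySem.List.pyGetD nmin 0 ((0:Int), (0:Int))).1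

-- ===== PORT B =====
-- B-side helper: one DP row — new_dp[j] = row[j] + min(dp[c] for c != j, default 0).
def pvRowB (k : Int) (dp : List Int) (row : List Int) : List Int :=
  (PySem.List.pyRange 0 k 1).map (fun j =>
    PySem.List.pyGetD row j 0 +
    PySem.List.minD
      (((PySem.List.pyRange 0 k 1).filter (fun c => decide (c ≠ j))).map
        (fun c => PySem.List.pyGetD dp c 0))
      (fun x => x) 0)

def min_cost_to_paint_walls_alt (costs : List (List Int)) : Int :=
  let n : Int := (costs.length : Int)
  if n = 0 then 0
  else
    let k : Int := ((PySem.List.pyGetD costs 0 []).length : Int)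
    if k = 1 ∧ 1 < n then -1
    else
      let dp := costs.foldl (fun dp row => pvRowB k dp row) (PySem.List.pyRepeat [(0:Int)] k)
      PySem.List.pyGetD (PySem.List.sorted dp (fun x => x)) 0 0

-- ===== PRECONDITION & SPEC =====
-- Exactly the inputs on which the Python A returns normally: it raises IndexError when the first
-- row is empty (k = 0 with n > 0) or when some later row is shorter than the first (costs[i][j])
-- — except that with k = 1 and n > 1 it returns -1 before ever reading the other rows.
def Pre_min_cost_to_paint_walls (costs : List (List Int)) : Prop :=
  costs = [] ∨
    (1 ≤ (costs.headI).length ∧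
      (((costs.headI).length = 1 ∧ 1 < costs.length) ∨
        ∀ row ∈ costs, (costs.headI).length ≤ row.length))
instance (costs : List (List Int)) : Decidable (Pre_min_cost_to_paint_walls costs) := by
  unfold Pre_min_cost_to_paint_walls; infer_instance

def pvWitness_min_cost_to_paint_walls : List (List Int) := [[1, 2], [3, 4]]

def Spec_min_cost_to_paint_walls (costs : List (List Int)) (out : Int) : Prop := out = min_cost_to_paint_walls_alt costs
instance (costs : List (List Int)) (out : Int) : Decidable (Spec_min_cost_to_paint_walls costs out) := by unfold Spec_min_cost_to_paint_walls; infer_instance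

-- ===== CLAIM (what is proved, stated in full; the proofs are below) =====
def Claim_equal_min_cost_to_paint_walls : Prop := ∀ (costs : List (List Int)), Dom_min_cost_to_paint_walls costs → Pre_min_cost_to_paint_walls costs → Spec_min_cost_to_paint_walls costs (min_cost_to_paint_walls costs)

-- ===== LEMMAS AND PROOFS =====

def pvLex (a b : Int × Int) : Prop := a.1 < b.1 ∨ (a.1 = b.1 ∧ a.2 < b.2)
def pvTop2 (P nm : List (Int × Int)) : Prop :=
  ∃ rest, (nm ++ rest).Perm P ∧ nm.length = min P.length 2 ∧ nm.Pairwise pvLex ∧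
    ∀ p ∈ rest, ∀ q ∈ nm, pvLex q p
def pvExm (k : Int) (g : Int → Int) (j : Int) : Int :=
  PySem.List.minD (((PySem.List.pyRange 0 k 1).filter (fun c => decide (c ≠ j))).map g)
    (fun x => x) 0
def pvPairs (k : Int) (g : Int → Int) : List (Int × Int) :=
  (PySem.List.pyRange 0 k 1).map (fun e => (g e, e))
def pvSel (nm : List (Int × Int)) (j : Int) : Int × Int :=
  if (PySem.List.pyGetD nm 0 ((0:Int), (0:Int))).2 = j
  then PySem.List.pyGetD nm 1 ((0:Int), (0:Int))
  else PySem.List.pyGetD nm 0 ((0:Int), (0:Int))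
def pvBef (a b : Int × Int) : Bool := decide (a.1 < b.1) || (!decide (b.1 < a.1) && decide (a.2 < b.2))

theorem pvLex_trans {a b c : Int × Int} (h1 : pvLex a b) (h2 : pvLex b c) : pvLex a c := by
  unfold pvLex at *; omega

theorem pvBef_eq_false_of_lex {a b : Int × Int} (h : pvLex a b) : pvBef b a = false := by
  unfold pvLex at h; simp only [pvBef]; simp; omega

theorem pvLex_of_bef_true {a b : Int × Int} (h : pvBef a b = true) : pvLex a b := by
  simp only [pvBef] at h; simp at h; unfold pvLex; omega

theorem pvLex_of_bef_false {a b : Int × Int} (h : pvBef a b = false) (hs : b.2 < a.2) :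
    pvLex b a := by
  simp only [pvBef] at h; simp at h; unfold pvLex; omega

theorem pvSlice2 {α : Type} (l : List α) :
    PySem.List.slice l none (some (2:Int)) = l.take 2 := by
  rw [show ((2:Int)) = ((2:Nat):Int) by norm_num, PySem.List.slice_to_natCast]

theorem pvSorted2_eq (l : List (Int × Int)) :
    PySem.List.sorted2 l Prod.fst Prod.snd = l.foldl (fun acc x => PySem.List.insertBy pvBef x acc) [] := by
  simp only [PySem.List.sorted2]
  rfl

theorem pvIns2 {P nm : List (Int × Int)} (h : pvTop2 P nm) (x : Int × Int)
    (hcol : ∀ p ∈ P, p.2 < x.2) :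
    pvTop2 (P ++ [x])
      (PySem.List.slice (PySem.List.sorted2 (nm ++ [x]) Prod.fst Prod.snd) none (some 2)) := by
  obtain ⟨rest, hperm, hlen, hpw, hmax⟩ := h
  rw [pvSlice2, pvSorted2_eq]
  match nm, hlen, hpw, hperm, hmax with
  | [], hlen, _, hperm, _ =>
    have hP : P = [] := by
      have hl : P.length = 0 := by simp at hlen; omega
      exact List.eq_nil_of_length_eq_zero hl
    subst hP
    refine ⟨[], ?_, ?_, ?_, by simp⟩ <;> simp [PySem.List.insertBy]
  | [a], hlen, _, hperm, _ =>
    have hl1 : P.length = 1 := by simp at hlen; omega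
    have hrest : rest = [] := by
      have := hperm.length_eq
      simp at this
      exact List.eq_nil_of_length_eq_zero (by omega)
    subst hrest
    have hP : P = [a] := by
      have : P.Perm [a] := by simpa using hperm.symm
      simpa using List.perm_singleton.mp this
    subst hP
    simp only [List.cons_append, List.nil_append, List.foldl_cons, List.foldl_nil,
      PySem.List.insertBy]
    by_cases hb : pvBef x a = true
    · rw [if_pos hb]
      exact ⟨[], by simpa using (List.Perm.swap a x []), by simp,
        by simp [pvLex_of_bef_true hb], by simp⟩
    · rw [if_neg hb]
      refine ⟨[], by simp, by simp, ?_, by simp⟩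
      have := pvLex_of_bef_false (by simpa using hb) (hcol a (by simp))
      simp [this]
  | a :: b :: t, hlen, hpw, hperm, hmax =>
    have hPlen := hperm.length_eq
    have ht : t = [] := by
      have h2 : t.length + 1 + 1 = min P.length 2 := by simpa using hlen
      exact List.eq_nil_of_length_eq_zero (by omega)
    subst ht
    have hab : pvLex a b := (List.pairwise_cons.mp hpw).1 b (by simp)
    have hmem_a : a ∈ P := hperm.mem_iff.mp (by simp)
    have hmem_b : b ∈ P := hperm.mem_iff.mp (by simp)
    have hperm' : (a :: b :: rest).Perm P := by simpa using hperm
    have hP2 : 2 ≤ P.length := by simp at hPlen ⊢; omega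
    simp only [List.cons_append, List.nil_append, List.foldl_cons, List.foldl_nil,
      PySem.List.insertBy, pvBef_eq_false_of_lex hab, if_neg (by simp : ¬ (false = true))]
    by_cases h1 : pvBef x a = true
    · rw [if_pos h1]
      have hxa := pvLex_of_bef_true h1
      refine ⟨b :: rest, ?_, ?_, by simp [hxa], ?_⟩
      · exact ((hperm'.cons x).trans (List.perm_append_singleton x P).symm)
      · simp; omega
      · intro p hp q hq
        have hpc : p = b ∨ p ∈ rest := by simpa using hp
        rcases (by simpa using hq : q = x ∨ q = a) with hq' | hq'
        · rcases hpc with rfl | hp'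
          · exact hq'.symm ▸ pvLex_trans hxa hab
          · exact hq'.symm ▸ pvLex_trans hxa (hmax p hp' a (by simp))
        · rcases hpc with rfl | hp'
          · exact hq'.symm ▸ hab
          · exact hq'.symm ▸ hmax p hp' a (by simp)
    · rw [if_neg h1]
      have hax := pvLex_of_bef_false (by simpa using h1) (hcol a hmem_a)
      by_cases h2 : pvBef x b = true
      · rw [if_pos h2]
        have hxb := pvLex_of_bef_true h2
        refine ⟨b :: rest, ?_, ?_, by simp [hax], ?_⟩
        · exact (((List.Perm.swap x a (b :: rest))).trans
            ((hperm'.cons x).trans (List.perm_append_singleton x P).symm))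
        · simp; omega
        · intro p hp q hq
          have hpc : p = b ∨ p ∈ rest := by simpa using hp
          rcases (by simpa using hq : q = a ∨ q = x) with hq' | hq'
          · rcases hpc with rfl | hp'
            · exact hq'.symm ▸ hab
            · exact hq'.symm ▸ hmax p hp' a (by simp)
          · rcases hpc with rfl | hp'
            · exact hq'.symm ▸ hxb
            · exact hq'.symm ▸ pvLex_trans hxb (hmax p hp' b (by simp))
      · rw [if_neg h2]
        have hbx := pvLex_of_bef_false (by simpa using h2) (hcol b hmem_b)
        refine ⟨x :: rest, ?_, ?_, by simp [hab], ?_⟩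
        · exact ((((List.Perm.swap x b rest).cons a).trans (List.Perm.swap x a (b :: rest))).trans
            ((hperm'.cons x).trans (List.perm_append_singleton x P).symm))
        · simp; omega
        · intro p hp q hq
          have hpc : p = x ∨ p ∈ rest := by simpa using hp
          rcases (by simpa using hq : q = a ∨ q = b) with hq' | hq'
          · rcases hpc with rfl | hp'
            · exact hq'.symm ▸ hax
            · exact hq'.symm ▸ hmax p hp' a (by simp)
          · rcases hpc with rfl | hp'
            · exact hq'.symm ▸ hbx
            · exact hq'.symm ▸ hmax p hp' b (by simp)

theorem pvLex_fst_le {a b : Int × Int} (h : pvLex a b) : a.1 ≤ b.1 := by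
  unfold pvLex at h; omega

theorem pvMem_exm_iff {k : Int} {g : Int → Int} {j y : Int} :
    y ∈ ((PySem.List.pyRange 0 k 1).filter (fun c => decide (c ≠ j))).map g
      ↔ ∃ c, 0 ≤ c ∧ c < k ∧ c ≠ j ∧ g c = y := by
  simp [List.mem_map, List.mem_filter, PySem.List.mem_pyRange_one]
  constructor
  · rintro ⟨c, ⟨⟨h1, h2⟩, h3⟩, h4⟩; exact ⟨c, h1, h2, h3, h4⟩
  · rintro ⟨c, h1, h2, h3, h4⟩; exact ⟨c, ⟨⟨h1, h2⟩, h3⟩, h4⟩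

theorem pvMem_pairs_iff {k : Int} {g : Int → Int} {p : Int × Int} :
    p ∈ pvPairs k g ↔ ∃ e, 0 ≤ e ∧ e < k ∧ p = (g e, e) := by
  simp [pvPairs, List.mem_map, PySem.List.mem_pyRange_one]
  constructor
  · rintro ⟨e, ⟨h1, h2⟩, h3⟩; exact ⟨e, h1, h2, h3.symm⟩
  · rintro ⟨e, h1, h2, h3⟩; exact ⟨e, ⟨h1, h2⟩, h3.symm⟩

theorem pvExm_eq {k : Int} {g : Int → Int} {j m : Int}
    (hmem : ∃ c, 0 ≤ c ∧ c < k ∧ c ≠ j ∧ g c = m)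
    (hmin : ∀ c, 0 ≤ c → c < k → c ≠ j → m ≤ g c) :
    pvExm k g j = m := by
  unfold pvExm PySem.List.minD
  have hmL : m ∈ ((PySem.List.pyRange 0 k 1).filter (fun c => decide (c ≠ j))).map g :=
    pvMem_exm_iff.mpr hmem
  cases h : PySem.List.min? (((PySem.List.pyRange 0 k 1).filter (fun c => decide (c ≠ j))).map g)
      (fun x => x) with
  | none =>
    rw [PySem.List.min?_eq_none_iff] at h
    rw [h] at hmL; simp at hmL
  | some m' =>
    simp only [Option.getD_some]
    have h1 : m' ≤ m := PySem.List.min?_isMin h m hmL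
    obtain ⟨c, hc0, hck, hcj, hgc⟩ := pvMem_exm_iff.mp (PySem.List.min?_mem h)
    exact le_antisymm (by omega) (hgc ▸ hmin c hc0 hck hcj)

theorem pvGetD_replicate (n : Nat) (c : Int) :
    PySem.List.pyGetD (List.replicate n (0:Int)) c 0 = 0 := by
  unfold PySem.List.pyGetD
  cases h : (PySem.List.pyGet? (List.replicate n (0:Int)) c) with
  | none => rfl
  | some v =>
    have := PySem.List.mem_of_pyGet?_eq_some _ h
    simp [List.eq_of_mem_replicate this]

theorem pvSel_init (k : Int) (j : Int) (hj0 : 0 ≤ j) :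
    (pvSel [((0:Int), (-1:Int)), (0, -1)] j).1
      = pvExm k (fun c => PySem.List.pyGetD (PySem.List.pyRepeat [(0:Int)] k) c 0) j := by
  have hg : ∀ c, PySem.List.pyGetD (PySem.List.pyRepeat [(0:Int)] k) c 0 = 0 := by
    intro c; rw [PySem.List.pyRepeat_singleton]; exact pvGetD_replicate _ c
  have hL : pvSel [((0:Int), (-1:Int)), (0, -1)] j = (0, -1) := by
    unfold pvSel
    rw [PySem.List.pyGetD_zero_cons]
    rw [if_neg (by simp; omega)]
  rw [hL]
  unfold pvExm PySem.List.minD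
  cases h : PySem.List.min?
      (((PySem.List.pyRange 0 k 1).filter (fun c => decide (c ≠ j))).map
        (fun c => PySem.List.pyGetD (PySem.List.pyRepeat [(0:Int)] k) c 0)) (fun x => x) with
  | none => rfl
  | some m =>
    obtain ⟨c, _, _, _, hgc⟩ := pvMem_exm_iff.mp (PySem.List.min?_mem h)
    simp only [Option.getD_some]
    rw [← hgc, hg c]

theorem pvSel_of_top2 {k : Int} (hk : 2 ≤ k) {g : Int → Int} {nm : List (Int × Int)}
    (h : pvTop2 (pvPairs k g) nm) (j : Int) (_hj0 : 0 ≤ j) (_hjk : j < k) :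
    (pvSel nm j).1 = pvExm k g j := by
  obtain ⟨rest, hperm, hlen, hpw, hmax⟩ := h
  have hPlen : (pvPairs k g).length = k.toNat := by
    simp [pvPairs, PySem.List.length_pyRange_one]
  have hnm2 : nm.length = 2 := by rw [hlen, hPlen]; omega
  match nm, hnm2, hpw, hperm, hmax with
  | [a, b], _, hpw, hperm, hmax =>
  have hab : pvLex a b := (List.pairwise_cons.mp hpw).1 b (by simp)
  have hmem_a : a ∈ pvPairs k g := hperm.mem_iff.mp (by simp)
  have hmem_b : b ∈ pvPairs k g := hperm.mem_iff.mp (by simp)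
  obtain ⟨ea, hea0, heak, haeq⟩ := pvMem_pairs_iff.mp hmem_a
  obtain ⟨eb, heb0, hebk, hbeq⟩ := pvMem_pairs_iff.mp hmem_b
  -- second components are distinct
  have hsnd : a.2 ≠ b.2 := by
    have hnodup : ((pvPairs k g).map Prod.snd).Nodup := by
      have : (pvPairs k g).map Prod.snd = PySem.List.pyRange 0 k 1 := by
        simp only [pvPairs, List.map_map]
        have h2 : (Prod.snd ∘ fun e : Int => (g e, e)) = id := rfl
        rw [h2, List.map_id]
      rw [this]; exact PySem.List.nodup_pyRange_one 0 k
    have hnodup' : (([a, b] ++ rest).map Prod.snd).Nodup :=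
      ((hperm.map Prod.snd).nodup_iff).mpr hnodup
    simp at hnodup'
    intro hcontra
    tauto
  -- any pair in P with colour c is reachable
  have hsplit : ∀ p ∈ pvPairs k g, p = a ∨ p = b ∨ p ∈ rest := by
    intro p hp
    have := hperm.mem_iff.mpr hp
    simpa using this
  by_cases hcase : a.2 = j
  · have hLHS : pvSel [a, b] j = b := by
      unfold pvSel
      rw [PySem.List.pyGetD_zero_cons, if_pos hcase]
      rfl
    rw [hLHS]
    symm
    apply pvExm_eq
    · refine ⟨eb, heb0, hebk, ?_, ?_⟩
      · rw [← hcase]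
        have heb2 : eb = b.2 := by rw [hbeq]
        rw [heb2]; exact Ne.symm hsnd
      · rw [hbeq]
    · intro c hc0 hck hcj
      rcases hsplit (g c, c) (pvMem_pairs_iff.mpr ⟨c, hc0, hck, rfl⟩) with hq | hq | hq
      · exfalso; exact hcj (by rw [← hcase, ← hq])
      · exact le_of_eq (by rw [← hq])
      · exact pvLex_fst_le (hmax _ hq b (by simp))
  · have hLHS : pvSel [a, b] j = a := by
      unfold pvSel
      rw [PySem.List.pyGetD_zero_cons, if_neg hcase]
    rw [hLHS]
    symm
    apply pvExm_eq
    · refine ⟨ea, hea0, heak, ?_, ?_⟩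
      · have hea2 : ea = a.2 := by rw [haeq]
        rw [hea2]; exact hcase
      · rw [haeq]
    · intro c hc0 hck hcj
      rcases hsplit (g c, c) (pvMem_pairs_iff.mpr ⟨c, hc0, hck, rfl⟩) with hq | hq | hq
      · exact le_of_eq (by rw [← hq])
      · have h1 : a.1 ≤ b.1 := pvLex_fst_le hab
        have h2 : b.1 = g c := by rw [← hq]
        omega
      · exact pvLex_fst_le (hmax _ hq a (by simp))

theorem pvRow {k : Int} (hk : 0 ≤ k) {dp : List Int} {min1 : List (Int × Int)}
    (hsel : ∀ j, 0 ≤ j → j < k →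
      (pvSel min1 j).1 = pvExm k (fun c => PySem.List.pyGetD dp c 0) j)
    (row : List Int) :
    pvTop2 (pvPairs k (fun e => PySem.List.pyGetD (pvRowB k dp row) e 0))
      (pvInnerA min1 row k) := by
  have hkey : ∀ m : Nat, (m:Int) ≤ k →
      pvTop2 ((PySem.List.pyRange 0 (m:Int) 1).map
          (fun e => (PySem.List.pyGetD row e 0
            + pvExm k (fun c => PySem.List.pyGetD dp c 0) e, e)))
        ((PySem.List.pyRange 1 ((m:Int)+1) 1).foldl (fun nm j =>
          let mini := if (PySem.List.pyGetD min1 0 ((0:Int), (0:Int))).2 = j - 1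
                      then PySem.List.pyGetD min1 1 ((0:Int), (0:Int))
                      else PySem.List.pyGetD min1 0 ((0:Int), (0:Int))
          let cost : Int × Int := (PySem.List.pyGetD row (j - 1) 0 + mini.1, j - 1)
          PySem.List.slice (PySem.List.sorted2 (nm ++ [cost]) Prod.fst Prod.snd) none (some 2))
          []) := by
    intro m
    induction m with
    | zero =>
      intro _
      rw [PySem.List.pyRange_one_eq_nil (by omega), PySem.List.pyRange_one_eq_nil (by omega)]
      exact ⟨[], by simp, by simp, by simp, by simp⟩
    | succ m ih =>
      intro hm
      push_cast at hm ⊢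
      have hm' : (m:Int) ≤ k := by omega
      have h1 : PySem.List.pyRange 1 ((m:Int)+1+1) 1
          = PySem.List.pyRange 1 ((m:Int)+1) 1 ++ [(m:Int)+1] :=
        PySem.List.pyRange_one_succ_right (by omega)
      have h2 : PySem.List.pyRange 0 ((m:Int)+1) 1
          = PySem.List.pyRange 0 (m:Int) 1 ++ [(m:Int)] :=
        PySem.List.pyRange_one_succ_right (by omega)
      rw [h1, h2, List.foldl_append, List.map_append]
      simp only [List.foldl_cons, List.foldl_nil, List.map_cons, List.map_nil,
        add_sub_cancel_right]
      have hself : (if (PySem.List.pyGetD min1 0 ((0:Int), (0:Int))).2 = (m:Int)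
            then PySem.List.pyGetD min1 1 ((0:Int), (0:Int))
            else PySem.List.pyGetD min1 0 ((0:Int), (0:Int))).1
          = pvExm k (fun c => PySem.List.pyGetD dp c 0) (m:Int) :=
        hsel (m:Int) (by omega) (by omega)
      rw [hself]
      apply pvIns2 (ih hm')
      intro p hp
      simp only [List.mem_map] at hp
      obtain ⟨e, he, rfl⟩ := hp
      have := PySem.List.mem_pyRange_one.mp he
      simpa using this.2
  have hP : pvPairs k (fun e => PySem.List.pyGetD (pvRowB k dp row) e 0)
      = (PySem.List.pyRange 0 k 1).map
          (fun e => (PySem.List.pyGetD row e 0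
            + pvExm k (fun c => PySem.List.pyGetD dp c 0) e, e)) := by
    unfold pvPairs
    apply List.map_congr_left
    intro e he
    have hb := PySem.List.mem_pyRange_one.mp he
    have : PySem.List.pyGetD (pvRowB k dp row) e 0
        = PySem.List.pyGetD row e 0 + pvExm k (fun c => PySem.List.pyGetD dp c 0) e := by
      unfold pvRowB
      exact PySem.List.pyGetD_map_pyRange_of_nonneg _ _ _ _ hb.1 hb.2
    show (PySem.List.pyGetD (pvRowB k dp row) e 0, e) = _
    rw [this]
  rw [hP]
  have hcast : ((k.toNat : Nat) : Int) = k := Int.toNat_of_nonneg hk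
  have := hkey k.toNat (by omega)
  rw [hcast] at this
  exact this

theorem pvWalk {k : Int} (hk : 0 ≤ k) (rows : List (List Int)) (dp : List Int)
    (nmA : List (Int × Int))
    (hsel : ∀ j, 0 ≤ j → j < k →
      (pvSel nmA j).1 = pvExm k (fun c => PySem.List.pyGetD dp c 0) j)
    (hk2 : 2 ≤ k ∨ rows.length ≤ 1) (hne : rows ≠ []) :
    pvTop2
      (pvPairs k (fun e =>
        PySem.List.pyGetD (rows.foldl (fun dp row => pvRowB k dp row) dp) e 0))
      (rows.foldl (fun nmin row => pvInnerA nmin row k) nmA) := by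
  induction rows generalizing dp nmA with
  | nil => exact absurd rfl hne
  | cons r rs ih =>
    simp only [List.foldl_cons]
    have h1 := pvRow hk hsel r
    cases rs with
    | nil => simpa using h1
    | cons r2 rs2 =>
      have hk2' : 2 ≤ k := by
        rcases hk2 with h | h
        · exact h
        · simp at h
      exact ih _ _ (fun j hj0 hjk => pvSel_of_top2 hk2' h1 j hj0 hjk)
        (Or.inl hk2') (by simp)

theorem pvBfoldLen (k : Int) (rows : List (List Int)) (dp : List Int)
    (hdp : dp.length = k.toNat) :
    (rows.foldl (fun dp row => pvRowB k dp row) dp).length = k.toNat := by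
  induction rows generalizing dp with
  | nil => simpa using hdp
  | cons r rs ih =>
    simp only [List.foldl_cons]
    exact ih _ (by simp [pvRowB, PySem.List.length_pyRange_one])

theorem pvExtract {k : Int} (hk : 1 ≤ k) {dp : List Int} (hdplen : dp.length = k.toNat)
    {nmA : List (Int × Int)}
    (h : pvTop2 (pvPairs k (fun e => PySem.List.pyGetD dp e 0)) nmA) :
    (PySem.List.pyGetD nmA 0 ((0:Int), (0:Int))).1
      = PySem.List.pyGetD (PySem.List.sorted dp (fun x => x)) 0 0 := by
  obtain ⟨rest, hperm, hlen, hpw, hmax⟩ := h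
  have hPlen : (pvPairs k (fun e => PySem.List.pyGetD dp e 0)).length = k.toNat := by
    simp [pvPairs, PySem.List.length_pyRange_one]
  match nmA, hlen, hpw, hperm, hmax with
  | [], hlen, _, _, _ =>
    exfalso; rw [hPlen] at hlen; simp at hlen; omega
  | a :: t, hlen, hpw, hperm, hmax =>
  have hdpne : dp ≠ [] := by
    intro hdp; rw [hdp] at hdplen; simp at hdplen; omega
  cases hs : PySem.List.sorted dp (fun x => x) with
  | nil => exact absurd ((PySem.List.sorted_eq_nil_iff dp _ false).mp hs) hdpne
  | cons m sTail =>
  rw [PySem.List.pyGetD_zero_cons, PySem.List.pyGetD_zero_cons]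
  have hm_min : ∀ y ∈ dp, m ≤ y := PySem.List.key_head_sorted_le dp (fun x => x) hs
  have hm_mem : m ∈ dp := by
    have : m ∈ PySem.List.sorted dp (fun x => x) := by rw [hs]; simp
    exact (PySem.List.mem_sorted dp _ false m).mp this
  have hmem_a : a ∈ pvPairs k (fun e => PySem.List.pyGetD dp e 0) :=
    hperm.mem_iff.mp (by simp)
  obtain ⟨ea, hea0, heak, haeq⟩ := pvMem_pairs_iff.mp hmem_a
  have ha1dp : a.1 ∈ dp := by
    have hget : PySem.List.pyGetD dp ea 0 = dp[ea.toNat] :=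
      PySem.List.pyGetD_eq_getElem dp 0 hea0 (by omega)
    have : a.1 = dp[ea.toNat]'(by omega) := by rw [haeq]; exact hget
    rw [this]; exact List.getElem_mem _
  -- m ≤ a.1
  have h1 : m ≤ a.1 := hm_min _ ha1dp
  -- a.1 ≤ m
  obtain ⟨c, hc, hcm⟩ := List.mem_iff_getElem.mp hm_mem
  have hpm : ((m, (c:Int)) : Int × Int) ∈ pvPairs k (fun e => PySem.List.pyGetD dp e 0) := by
    apply pvMem_pairs_iff.mpr
    refine ⟨(c:Int), by omega, by omega, ?_⟩
    have : PySem.List.pyGetD dp (c:Int) 0 = dp.getD c 0 := PySem.List.pyGetD_natCast dp c 0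
    rw [this, List.getD_eq_getElem dp 0 hc, hcm]
  have h2 : a.1 ≤ m := by
    rcases (by simpa using hperm.mem_iff.mpr hpm :
        (m, (c:Int)) = a ∨ (m, (c:Int)) ∈ t ∨ (m, (c:Int)) ∈ rest) with hq | hq | hq
    · exact le_of_eq (by rw [← hq])
    · exact pvLex_fst_le ((List.pairwise_cons.mp hpw).1 _ hq)
    · exact pvLex_fst_le (hmax _ hq a (by simp))
  omega

theorem pvShift {β : Type} (m : Nat) (f : β → Int → β) (init : β) :
    (PySem.List.pyRange 1 ((m : Int) + 1) 1).foldl f init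
      = (PySem.List.pyRange 0 (m : Int) 1).foldl (fun acc i => f acc (i + 1)) init := by
  induction m generalizing init with
  | zero => simp [PySem.List.pyRange_one_eq_nil]
  | succ m ih =>
    push_cast
    have h1 : PySem.List.pyRange 1 ((m:Int)+1+1) 1
        = PySem.List.pyRange 1 ((m:Int)+1) 1 ++ [(m:Int)+1] :=
      PySem.List.pyRange_one_succ_right (by omega)
    have h2 : PySem.List.pyRange 0 ((m:Int)+1) 1
        = PySem.List.pyRange 0 ((m:Int)) 1 ++ [(m:Int)] :=
      PySem.List.pyRange_one_succ_right (by omega)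
    rw [h1, h2]
    simp only [List.foldl_append, List.foldl_cons, List.foldl_nil]
    rw [ih]

-- ===== VERDICT (by name: the statement is the Claim_ definition above) =====
theorem min_cost_to_paint_walls_spec : Claim_equal_min_cost_to_paint_walls := by
  intro costs _ hpre
  unfold Spec_min_cost_to_paint_walls
  cases costs with
  | nil => rfl
  | cons r rs =>
    have hpre' : 1 ≤ r.length ∧ ((r.length = 1 ∧ 1 < (r :: rs).length) ∨
        ∀ row ∈ r :: rs, r.length ≤ row.length) := by
      rcases hpre with h | h
      · exact absurd h (by simp)
      · simpa using h
    have hn : (0:Int) < ((r :: rs).length : Int) := by simp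
    unfold min_cost_to_paint_walls min_cost_to_paint_walls_alt
    simp only [PySem.List.pyGetD_zero_cons, if_pos hn]
    rw [if_neg (by omega : ¬ (((r :: rs).length : Int) = 0))]
    by_cases hg : ((r.length : Int) = 1 ∧ 1 < ((r :: rs).length : Int))
    · rw [if_pos hg, if_pos hg]
    · rw [if_neg hg, if_neg hg]
      -- turn A's index loop into a fold over the rows
      rw [pvShift ((r :: rs).length)
        (fun nmin i => pvInnerA nmin (PySem.List.pyGetD (r :: rs) (i - 1) []) (r.length : Int))
        [((0:Int), (-1:Int)), (0, -1)]]
      simp only [add_sub_cancel_right]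
      rw [PySem.List.foldl_pyRange_zero_pyGetD' (r :: rs) []
        (fun acc row => pvInnerA acc row (r.length : Int)) [((0:Int), (-1:Int)), (0, -1)]]
      -- relate the two folds
      have hk0 : (0:Int) ≤ (r.length : Int) := by positivity
      have hk1 : (1:Int) ≤ (r.length : Int) := by exact_mod_cast hpre'.1
      have hk2 : 2 ≤ (r.length : Int) ∨ (r :: rs).length ≤ 1 := by
        by_cases hlen1 : (r :: rs).length ≤ 1
        · exact Or.inr hlen1
        · left
          have : ¬ ((r.length : Int) = 1) := fun hc => hg ⟨hc, by omega⟩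
          omega
      have hwalk := pvWalk hk0 (r :: rs) (PySem.List.pyRepeat [(0:Int)] (r.length : Int))
        [((0:Int), (-1:Int)), (0, -1)]
        (fun j hj0 _ => pvSel_init (r.length : Int) j hj0) hk2 (by simp)
      have hdplen : (PySem.List.pyRepeat [(0:Int)] (r.length : Int)).length
          = ((r.length : Int)).toNat := by
        rw [PySem.List.pyRepeat_singleton]; simp
      exact pvExtract hk1 (pvBfoldLen _ _ _ hdplen) hwalk
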